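-- pv_equiv track=rewrite | github.com/spcaswell/exercises | practice/string_permutation/main.py | counter_perm_search
-- ===== SOURCE A (Python) =====
-- from typing import Set
-- from collections import Counter
--
-- def counter_perm_search(s: str, b: str) -> Set[str]:
--     """
--         Given two strings s and b, such that len(s) <= len(b), find all permutations of s in b
--         Now with Counters!!
--     """
--     left = 0
--     perms = set()
--     letter_check = Counter(s)
--
--     while left <= len(b) - len(s):
--         right = left + len(s)
--         perm_check = Counter(b[left:right])
--         if perm_check == letter_check:
--             perms.add(b[left:right])
--         left += 1
--     return perms
-- ===== SOURCE B (Python) =====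
-- from collections import Counter
--
-- def counter_perm_search(s, b):
--     """Sliding-window Counter: add the entering char, remove the leaving one (one pass)."""
--     n, m = len(s), len(b)
--     perms = set()
--     if n > m:
--         return perms
--     target = Counter(s)
--     window = Counter(b[:n])
--     for left in range(m - n + 1):
--         if window == target:
--             perms.add(b[left:left + n])
--         if left + n < m:
--             window[b[left + n]] += 1
--             window[b[left]] -= 1
--             if window[b[left]] == 0:
--                 del window[b[left]]
--     return perms
-- ===== Notes on version B (the rewrite author's own statement) =====
-- stated objective: alternative
-- what changed: B keeps one sliding-window Counter updated incrementally (add the entering char, remove the leaving one) instead of rebuilding Counter(b[left:right]) from scratch at every position.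
import Mathlib
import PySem

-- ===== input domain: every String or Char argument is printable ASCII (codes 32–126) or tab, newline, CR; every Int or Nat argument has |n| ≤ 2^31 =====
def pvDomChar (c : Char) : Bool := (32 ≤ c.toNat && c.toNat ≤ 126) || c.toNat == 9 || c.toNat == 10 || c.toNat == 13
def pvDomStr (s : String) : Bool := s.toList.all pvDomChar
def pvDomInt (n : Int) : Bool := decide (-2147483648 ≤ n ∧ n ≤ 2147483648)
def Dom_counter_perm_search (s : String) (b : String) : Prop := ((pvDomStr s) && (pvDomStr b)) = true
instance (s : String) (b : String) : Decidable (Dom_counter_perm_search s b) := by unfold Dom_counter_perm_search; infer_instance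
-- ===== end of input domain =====

-- B replaces A's per-window Counter rebuild by one incremental sliding-window counter (objective: alternative).
-- Python Counters with nonnegative counts (and zero counts deleted) compare exactly as multisets: both ports
-- model Counter values as Multiset Char, which is exact for every Counter operation the two programs perform.

-- ===== PORT A =====
-- A's while loop: rebuild Counter(b[left:right]) from scratch at every left.
def cpsLoopA (target : Multiset Char) (bl : List Char) (n m : Int) (left : Int)
    (perms : PySem.Set String) : PySem.Set String :=
  if left ≤ m - n then
    let win := PySem.List.slice bl (some left) (some (left + n))
    let perms' := if (win : Multiset Char) = target then PySem.Set.add perms (String.ofList win) else perms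
    cpsLoopA target bl n m (left + 1) perms'
  else perms
termination_by (m - n + 1 - left).toNat
decreasing_by omega

def counter_perm_search (s : String) (b : String) : List String :=
  cpsLoopA (Multiset.ofList s.toList) b.toList (s.toList.length : Int) (b.toList.length : Int) 0 PySem.Set.empty

-- ===== PORT B =====
-- one step of B's for-loop: record a hit, then slide the window (add entering char, erase leaving char).
def cpsStepB (target : Multiset Char) (bl : List Char) (n m : Int)
    (st : Multiset Char × PySem.Set String) (left : Int) : Multiset Char × PySem.Set String :=
  let perms' := if st.1 = target then
      PySem.Set.add st.2 (String.ofList (PySem.List.slice bl (some left) (some (left + n)))) else st.2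
  -- window[b[left+n]] += 1 then window[b[left]] -= 1 with deletion at zero = multiset add then erase
  let window' := if left + n < m then
      (st.1 + {PySem.List.pyGetD bl (left + n) ' '}).erase (PySem.List.pyGetD bl left ' ') else st.1
  (window', perms')

def counter_perm_search_alt (s : String) (b : String) : List String :=
  let sl := s.toList
  let bl := b.toList
  let n : Int := sl.length
  let m : Int := bl.length
  if n > m then PySem.Set.empty
  else
    ((PySem.List.pyRange 0 (m - n + 1) 1).foldl (cpsStepB (Multiset.ofList sl) bl n m)
      (Multiset.ofList (PySem.List.slice bl none (some n)), PySem.Set.empty)).2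

-- ===== PRECONDITION & SPEC =====
def Spec_counter_perm_search (s : String) (b : String) (out : List String) : Prop := out = counter_perm_search_alt s b
instance (s : String) (b : String) (out : List String) : Decidable (Spec_counter_perm_search s b out) := by unfold Spec_counter_perm_search; infer_instance

-- ===== CLAIM (what is proved, stated in full; the proofs are below) =====
def Claim_equal_counter_perm_search : Prop := ∀ (s : String) (b : String), Dom_counter_perm_search s b → Spec_counter_perm_search s b (counter_perm_search s b)

-- ===== LEMMAS AND PROOFS =====

-- sliding the window one step: erase the leaving char, add the entering one
lemma window_slide (l : List Char) (L N : Nat) (h : L + N < l.length) :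
    ((((l.drop L).take N : List Char) : Multiset Char) + {l[L + N]}).erase l[L]
      = (((l.drop (L + 1)).take N : List Char) : Multiset Char) := by
  have hL : L < l.length := by omega
  have h1 : (l.drop L).take (N + 1) = l[L] :: (l.drop (L + 1)).take N := by
    rw [List.drop_eq_getElem_cons hL, List.take_succ_cons]
  have h2 : (l.drop L).take (N + 1) = (l.drop L).take N ++ [l[L + N]] := by
    rw [List.take_add_one]
    congr 1
    have hN : N < (l.drop L).length := by simp; omega
    rw [List.getElem?_eq_getElem hN]
    simp [List.getElem_drop]
  have : ((((l.drop L).take N : List Char) : Multiset Char) + {l[L + N]})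
      = l[L] ::ₘ (((l.drop (L + 1)).take N : List Char) : Multiset Char) := by
    rw [← Multiset.coe_singleton, Multiset.coe_add, ← h2, h1, ← Multiset.cons_coe]
  rw [this, Multiset.erase_cons_head]

lemma loop_eq (target : Multiset Char) (bl : List Char) (n : Int) (hn : 0 ≤ n) :
    ∀ (k : Nat) (left : Int) (perms : PySem.Set String), 0 ≤ left →
      ((bl.length : Int) - n + 1 - left).toNat = k →
      cpsLoopA target bl n (bl.length : Int) left perms
        = ((PySem.List.pyRange left ((bl.length : Int) - n + 1) 1).foldl
            (cpsStepB target bl n (bl.length : Int))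
            ((PySem.List.slice bl (some left) (some (left + n)) : List Char), perms)).2 := by
  obtain ⟨N, rfl⟩ : ∃ N : Nat, n = (N : Int) := ⟨n.toNat, by omega⟩
  intro k
  induction k with
  | zero =>
    intro left perms hl hk
    have hgt : ¬ left ≤ (bl.length : Int) - N := by omega
    rw [cpsLoopA, if_neg hgt, PySem.List.pyRange_one_eq_nil (by omega)]
    simp [List.foldl]
  | succ k ih =>
    intro left perms hl hk
    obtain ⟨L, rfl⟩ : ∃ L : Nat, left = (L : Int) := ⟨left.toNat, by omega⟩
    have hle : (L : Int) ≤ (bl.length : Int) - N := by omega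
    rw [cpsLoopA, if_pos hle,
        PySem.List.pyRange_one_cons (by omega : (L : Int) < (bl.length : Int) - N + 1)]
    simp only [List.foldl_cons]
    set win := PySem.List.slice bl (some (L : Int)) (some ((L : Int) + N)) with hwin
    set perms' := if (win : Multiset Char) = target then PySem.Set.add perms (String.ofList win) else perms with hperms'
    have hstep : cpsStepB target bl N (bl.length : Int) ((win : Multiset Char), perms) (L : Int)
        = ((if (L : Int) + N < (bl.length : Int) then
              ((win : Multiset Char) + {PySem.List.pyGetD bl ((L : Int) + N) ' '}).erase (PySem.List.pyGetD bl (L : Int) ' ')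
            else (win : Multiset Char)), perms') := by
      simp [cpsStepB, hperms', hwin]
    rw [hstep]
    by_cases hin : (L : Int) + N < (bl.length : Int)
    · rw [if_pos hin]
      have hrange : L + N < bl.length := by omega
      -- the slid window is exactly the counter of the next slice
      have hslide : ((win : Multiset Char) + {PySem.List.pyGetD bl ((L : Int) + N) ' '}).erase (PySem.List.pyGetD bl (L : Int) ' ')
          = ((PySem.List.slice bl (some ((L : Int) + 1)) (some ((L : Int) + 1 + N)) : List Char) : Multiset Char) := by
        have e1 : win = (bl.drop L).take N := PySem.List.slice_natCast_add bl L N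
        have e2 : PySem.List.slice bl (some ((L : Int) + 1)) (some ((L : Int) + 1 + N))
            = (bl.drop (L + 1)).take N := by
          have h1 : ((L : Int) + 1) = ((L + 1 : Nat) : Int) := by push_cast; ring
          rw [h1]
          exact PySem.List.slice_natCast_add bl (L + 1) N
        have e3 : PySem.List.pyGetD bl ((L : Int) + N) ' ' = bl[L + N]'hrange := by
          have h2 : ((L : Int) + N) = ((L + N : Nat) : Int) := by push_cast; ring
          rw [h2, PySem.List.pyGetD_natCast]
          exact List.getD_eq_getElem bl ' ' hrange
        have e4 : PySem.List.pyGetD bl (L : Int) ' ' = bl[L]'(by omega) := by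
          rw [PySem.List.pyGetD_natCast]
          exact List.getD_eq_getElem bl ' ' (by omega)
        rw [e1, e2, e3, e4]
        exact window_slide bl L N hrange
      rw [hslide]
      have := ih ((L : Int) + 1) perms' (by omega) (by omega)
      simpa using this
    · rw [if_neg hin]
      -- last window: the remaining range is empty on both sides
      have hterm : ¬ (L : Int) + 1 ≤ (bl.length : Int) - N := by omega
      rw [cpsLoopA, if_neg hterm, PySem.List.pyRange_one_eq_nil (by omega : (bl.length : Int) - N + 1 ≤ (L : Int) + 1)]
      simp [List.foldl]

-- ===== VERDICT (by name: the statement is the Claim_ definition above) =====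
theorem counter_perm_search_spec : Claim_equal_counter_perm_search := by
  intro s b _
  unfold Spec_counter_perm_search counter_perm_search counter_perm_search_alt
  by_cases hgt : (s.toList.length : Int) > (b.toList.length : Int)
  · rw [if_pos hgt, cpsLoopA, if_neg (by omega)]
  · rw [if_neg hgt]
    have h0 : PySem.List.slice b.toList (some 0) (some (0 + (s.toList.length : Int)))
        = PySem.List.slice b.toList none (some (s.toList.length : Int)) := by
      simp
    rw [loop_eq (Multiset.ofList s.toList) b.toList (s.toList.length : Int) (by positivity) _ 0
        PySem.Set.empty le_rfl rfl, h0]
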